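-- pv_equiv track=rewrite | github.com/teriyakichild/mcp-condenser | mcp_condenser/condenser.py | _join_blocks
-- ===== SOURCE A (Python) =====
-- def _is_scalar_line(block: str) -> bool:
--     """True if block is a single key: value line (no header/section)."""
--     return "\n" not in block and not block.startswith("---")
--
-- def _join_blocks(blocks: list[str]) -> str:
--     """Join blocks, grouping consecutive scalar lines with single newlines."""
--     if not blocks:
--         return ""
--     parts = []
--     scalar_group: list[str] = []
--     for block in blocks:
--         if _is_scalar_line(block):
--             scalar_group.append(block)
--         else:
--             if scalar_group:
--                 parts.append("\n".join(scalar_group))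
--                 scalar_group = []
--             parts.append(block)
--     if scalar_group:
--         parts.append("\n".join(scalar_group))
--     return "\n\n".join(parts)
-- ===== SOURCE B (Python) =====
-- def _is_scalar_line(block: str) -> bool:
--     """True if block is a single key: value line (no header/section)."""
--     return "\n" not in block and not block.startswith("---")
--
-- def _join_blocks(blocks: list[str]) -> str:
--     """Join blocks; maximal runs of scalar lines are found by an inner scan
--     and joined with single newlines, other blocks stand alone."""
--     parts = []
--     i = 0
--     n = len(blocks)
--     while i < n:
--         if _is_scalar_line(blocks[i]):
--             j = i
--             while j < n and _is_scalar_line(blocks[j]):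
--                 j += 1
--             parts.append("\n".join(blocks[i:j]))
--             i = j
--         else:
--             parts.append(blocks[i])
--             i += 1
--     return "\n\n".join(parts)
-- ===== Notes on version B (the rewrite author's own statement) =====
-- stated objective: alternative
-- what changed: Replaces A's single-pass fold carrying a pending scalar_group accumulator (with an end-of-loop flush) by a run-based scan: an inner scan finds each maximal run of scalar lines, joins the slice at once, and non-scalar blocks are emitted directly, with no pending state or flush.
import Mathlib
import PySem

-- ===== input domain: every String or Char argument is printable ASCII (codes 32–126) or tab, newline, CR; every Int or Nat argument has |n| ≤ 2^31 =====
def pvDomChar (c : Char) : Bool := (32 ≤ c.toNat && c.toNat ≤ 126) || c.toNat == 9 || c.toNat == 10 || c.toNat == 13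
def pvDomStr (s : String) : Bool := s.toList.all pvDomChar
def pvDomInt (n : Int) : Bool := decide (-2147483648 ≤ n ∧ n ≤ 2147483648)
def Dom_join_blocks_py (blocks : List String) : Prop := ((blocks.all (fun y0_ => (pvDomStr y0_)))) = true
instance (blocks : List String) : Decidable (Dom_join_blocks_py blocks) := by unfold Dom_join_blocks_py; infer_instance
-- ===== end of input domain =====

-- B replaces A's fold with a pending scalar_group accumulator by a run-based scan
-- (inner scan over each maximal scalar run); alternative decomposition, same cost.

-- ===== PORT A =====
def pvIsScalarLine (block : String) : Bool :=
  !(PySem.Str.isIn "\n" block) && !(PySem.Str.startswith block "---")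

-- one iteration of A's for-loop: state = (parts, scalar_group)
def pvAStep (st : List String × List String) (block : String) : List String × List String :=
  if pvIsScalarLine block then (st.1, st.2 ++ [block])
  else if st.2.isEmpty then (st.1 ++ [block], [])
  else (st.1 ++ [PySem.Str.join "\n" st.2, block], [])

-- A's trailing 'if scalar_group: parts.append(...)'
def pvAFin (st : List String × List String) : List String :=
  if st.2.isEmpty then st.1 else st.1 ++ [PySem.Str.join "\n" st.2]

def join_blocks_py (blocks : List String) : String :=
  if blocks.isEmpty then ""
  else PySem.Str.join "\n\n" (pvAFin (blocks.foldl pvAStep ([], [])))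

-- ===== PORT B =====
-- B's outer while loop; the inner 'while j < n and scalar' scan is takeWhile/dropWhile
def pvAltGo : List String → List String
  | [] => []
  | b :: rest =>
    if pvIsScalarLine b then
      PySem.Str.join "\n" (b :: rest.takeWhile pvIsScalarLine)
        :: pvAltGo (rest.dropWhile pvIsScalarLine)
    else b :: pvAltGo rest
termination_by l => l.length
decreasing_by
  · exact Nat.lt_succ_of_le (List.length_dropWhile_le _ _)
  · exact Nat.lt_succ_self _

def join_blocks_py_alt (blocks : List String) : String :=
  PySem.Str.join "\n\n" (pvAltGo blocks)

-- ===== PRECONDITION & SPEC =====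
def Spec_join_blocks_py (blocks : List String) (out : String) : Prop := out = join_blocks_py_alt blocks
instance (blocks : List String) (out : String) : Decidable (Spec_join_blocks_py blocks out) := by unfold Spec_join_blocks_py; infer_instance

-- ===== CLAIM (what is proved, stated in full; the proofs are below) =====
def Claim_equal_join_blocks_py : Prop := ∀ (blocks : List String), Dom_join_blocks_py blocks → Spec_join_blocks_py blocks (join_blocks_py blocks)

-- ===== LEMMAS AND PROOFS =====

-- A's fold result, abstracted over the pending scalar group
def pvAux (sg : List String) : List String → List String
  | [] => if sg.isEmpty then [] else [PySem.Str.join "\n" sg]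
  | b :: rest =>
    if pvIsScalarLine b then pvAux (sg ++ [b]) rest
    else if sg.isEmpty then b :: pvAux [] rest
    else PySem.Str.join "\n" sg :: b :: pvAux [] rest

theorem pvFold_eq (blocks : List String) :
    ∀ (parts sg : List String),
      pvAFin (blocks.foldl pvAStep (parts, sg)) = parts ++ pvAux sg blocks := by
  induction blocks with
  | nil =>
    intro parts sg
    simp only [List.foldl_nil, pvAFin, pvAux]
    by_cases h : sg.isEmpty <;> simp [h]
  | cons b rest ih =>
    intro parts sg
    simp only [List.foldl_cons, pvAStep, pvAux]
    by_cases hb : pvIsScalarLine b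
    · simp [hb, ih]
    · by_cases hsg : sg.isEmpty
      · simp [hb, hsg, ih]
      · simp [hb, hsg, ih]

theorem pvAux_eq (blocks : List String) :
    ∀ (sg : List String),
      pvAux sg blocks =
        if sg.isEmpty then pvAltGo blocks
        else PySem.Str.join "\n" (sg ++ blocks.takeWhile pvIsScalarLine)
              :: pvAltGo (blocks.dropWhile pvIsScalarLine) := by
  induction blocks with
  | nil =>
    intro sg
    by_cases h : sg.isEmpty
    · simp [pvAux, h, pvAltGo]
    · simp [pvAux, h, pvAltGo]
  | cons b rest ih =>
    intro sg
    by_cases hb : pvIsScalarLine b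
    · have hne : (sg ++ [b]).isEmpty = false := by simp
      by_cases hsg : sg.isEmpty
      · have : sg = [] := List.isEmpty_iff.mp hsg
        subst this
        simp [pvAux, hb, ih, pvAltGo]
      · simp [pvAux, hb, ih, hne, hsg]
    · by_cases hsg : sg.isEmpty
      · simp [pvAux, hb, hsg, ih, pvAltGo]
      · simp [pvAux, hb, hsg, ih, pvAltGo]

theorem join_blocks_py_spec : Claim_equal_join_blocks_py := by
  intro blocks _
  unfold Spec_join_blocks_py join_blocks_py join_blocks_py_alt
  by_cases h : blocks.isEmpty
  · have : blocks = [] := List.isEmpty_iff.mp h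
    subst this
    simp [h, pvAltGo]
    decide
  · simp only [h, if_false, Bool.false_eq_true]
    rw [pvFold_eq blocks [] [], pvAux_eq blocks []]
    simp
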